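-- pv_equiv track=rewrite | github.com/BSChuang/Food-Truck | Helpers.py | threeListToString
-- ===== SOURCE A (Python) =====
-- def threeListToString(arr):
--     string = ""
--     for i in range(len(arr)):
--         string += arr[i]
--         if i != len(arr) - 1:
--             string += ", "
--             if i % 3 == 2:
--                 string += "\n"
--     return string
-- ===== SOURCE B (Python) =====
-- def threeListToString(arr):
--     parts = []
--     i = 0
--     while i < len(arr):
--         parts.append(", ".join(arr[i:i+3]))
--         i += 3
--     return ", \n".join(parts)
-- ===== Notes on version B (the rewrite author's own statement) =====
-- stated objective: simpler
-- what changed: Replaces A's per-index loop with its i%3==2 and i!=len-1 separator tests by grouping: a loop that collects the ', '-joined chunks of three and a single ', '.join over the chunk strings.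
import Mathlib
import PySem

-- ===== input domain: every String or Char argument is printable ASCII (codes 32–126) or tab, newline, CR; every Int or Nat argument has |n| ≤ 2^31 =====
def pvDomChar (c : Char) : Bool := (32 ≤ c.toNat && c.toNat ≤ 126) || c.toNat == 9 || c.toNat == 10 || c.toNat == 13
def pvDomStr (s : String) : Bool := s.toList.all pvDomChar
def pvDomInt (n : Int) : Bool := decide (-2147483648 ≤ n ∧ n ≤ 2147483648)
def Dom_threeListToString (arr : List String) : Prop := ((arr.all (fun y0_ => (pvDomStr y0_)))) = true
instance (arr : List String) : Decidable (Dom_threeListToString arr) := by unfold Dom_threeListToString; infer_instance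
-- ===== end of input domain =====

-- B replaces A's index loop (with its i%3==2 and i!=len-1 tests) by recursion on chunks of
-- three, joining each chunk with ", " and chunks with ", \n" — a simpler decomposition, same output.

-- ===== PORT A =====
def threeListToString (arr : List String) : String :=
  (PySem.List.pyRange 0 (arr.length : Int) 1).foldl
    (fun string i =>
      let string := string ++ ((PySem.List.pyGet? arr i).getD "")
      if i ≠ (arr.length : Int) - 1 then
        let string := string ++ ", "
        if PySem.Int.mod i 3 = 2 then string ++ "\n" else string
      else string) ""

-- ===== PORT B =====
-- while loop: collect the ", "-joined chunks of three, then join them with ", \n"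
def altParts (arr : List String) (parts : List String) (i : Nat) : List String :=
  if i < arr.length then
    altParts arr
      (parts ++ [PySem.Str.join ", " (PySem.List.slice arr (some (i : Int)) (some ((i : Int) + 3)))])
      (i + 3)
  else parts
termination_by arr.length - i

def threeListToString_alt (arr : List String) : String :=
  PySem.Str.join ", \n" (altParts arr [] 0)

-- ===== PRECONDITION & SPEC =====
def Spec_threeListToString (arr : List String) (out : String) : Prop := out = threeListToString_alt arr
instance (arr : List String) (out : String) : Decidable (Spec_threeListToString arr out) := by unfold Spec_threeListToString; infer_instance

-- ===== CLAIM (what is proved, stated in full; the proofs are below) =====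
def Claim_equal_threeListToString : Prop := ∀ (arr : List String), Dom_threeListToString arr → Spec_threeListToString arr (threeListToString arr)

-- ===== LEMMAS AND PROOFS =====

-- the chunk recursion both sides are reduced to: chunks of three, ", \n" between chunks
def chunkRec (arr : List String) : String :=
  if arr = [] then ""
  else
    let s := PySem.Str.join ", " (PySem.List.slice arr none (some 3))
    let rest := PySem.List.slice arr (some 3) none
    if rest = [] then s
    else s ++ ", \n" ++ chunkRec rest
termination_by arr.length
decreasing_by
  rename_i h _
  have h3 : PySem.List.slice arr (some 3) none = arr.drop 3 := by simp [pysem]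
  rw [h3]
  have : arr.length ≠ 0 := fun hz => h (List.eq_nil_of_length_eq_zero hz)
  simp only [List.length_drop]
  omega

-- the chunk strings, as a list
def chunksOf (arr : List String) : List String :=
  if arr = [] then []
  else
    PySem.Str.join ", " (PySem.List.slice arr none (some 3)) ::
      chunksOf (PySem.List.slice arr (some 3) none)
termination_by arr.length
decreasing_by
  rename_i h
  have h3 : PySem.List.slice arr (some 3) none = arr.drop 3 := by simp [pysem]
  rw [h3]
  have : arr.length ≠ 0 := fun hz => h (List.eq_nil_of_length_eq_zero hz)
  simp only [List.length_drop]
  omega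

-- the piece A's loop appends for index i
def gA (arr : List String) (n : Int) (i : Int) : String :=
  ((PySem.List.pyGet? arr i).getD "") ++
    (if i ≠ n - 1 then (if PySem.Int.mod i 3 = 2 then ", " ++ "\n" else ", ") else "")

def concatS : List String → String
  | [] => ""
  | x :: t => x ++ concatS t

theorem concatS_append (l1 l2 : List String) : concatS (l1 ++ l2) = concatS l1 ++ concatS l2 := by
  induction l1 with
  | nil => simp [concatS]
  | cons x t ih => simp [concatS, ih, String.append_assoc]

theorem foldl_append_string (f : Int → String) (l : List Int) :
    ∀ s : String, l.foldl (fun acc i => acc ++ f i) s = s ++ concatS (l.map f) := by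
  induction l with
  | nil => intro s; simp [concatS]
  | cons x t ih => intro s; simp [List.foldl_cons, ih, concatS, String.append_assoc]

theorem threeListToString_eq_concat (arr : List String) :
    threeListToString arr =
      concatS ((PySem.List.pyRange 0 (arr.length : Int) 1).map (gA arr (arr.length : Int))) := by
  unfold threeListToString
  have hbody : (fun (string : String) (i : Int) =>
      let string := string ++ ((PySem.List.pyGet? arr i).getD "")
      if i ≠ (arr.length : Int) - 1 then
        let string := string ++ ", "
        if PySem.Int.mod i 3 = 2 then string ++ "\n" else string
      else string) = fun acc i => acc ++ gA arr (arr.length : Int) i := by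
    funext s i
    simp only [gA]
    split_ifs <;> simp [String.append_assoc]
  rw [hbody, foldl_append_string]
  simp

-- shift by three: the piece for index 3+k in x::y::z::t is the piece for index k in t
theorem gA_shift (x y z : String) (t : List String) (k : Nat) :
    gA (x :: y :: z :: t) ((t.length : Int) + 3) (3 + (k : Int)) = gA t (t.length : Int) (k : Int) := by
  simp only [gA]
  have hget : PySem.List.pyGet? (x :: y :: z :: t) (3 + (k : Int)) = PySem.List.pyGet? t (k : Int) := by
    have h3 : (3 : Int) + (k : Int) = ((3 + k : Nat) : Int) := by push_cast; ring
    rw [h3, PySem.List.pyGet?_natCast, PySem.List.pyGet?_natCast]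
    simp [Nat.add_comm]
  have hcond : (3 + (k : Int) ≠ (t.length : Int) + 3 - 1) ↔ ((k : Int) ≠ (t.length : Int) - 1) := by omega
  have hmod : PySem.Int.mod (3 + (k : Int)) 3 = PySem.Int.mod (k : Int) 3 := by
    rw [PySem.Int.mod_eq_emod_of_pos (by norm_num), PySem.Int.mod_eq_emod_of_pos (by norm_num)]
    omega
  rw [hget, hmod]
  by_cases h : (k : Int) ≠ (t.length : Int) - 1
  · rw [if_pos h, if_pos (hcond.mpr h)]
  · rw [if_neg h, if_neg (fun hc => h (hcond.mp hc))]

set_option maxHeartbeats 2000000 in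
theorem concat_gA_eq_chunkRec : ∀ (arr : List String),
    concatS ((PySem.List.pyRange 0 (arr.length : Int) 1).map (gA arr (arr.length : Int))) =
      chunkRec arr
  | [] => by
    unfold chunkRec
    simp [PySem.List.pyRange_one_eq_nil, concatS]
  | [x] => by
    unfold chunkRec
    have h : PySem.List.pyRange 0 ((1:Nat) : Int) 1 = [0] := by decide
    simp only [List.length_cons, List.length_nil, Nat.zero_add] at *
    rw [h]
    have hs : PySem.List.slice [x] none (some 3) = [x] := by simp [pysem]
    have hr : PySem.List.slice ([x] : List String) (some 3) none = [] := by simp [pysem]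
    rw [hs, hr]
    simp [concatS, gA, PySem.Str.join, PySem.Chars.join_singleton]
  | [x, y] => by
    unfold chunkRec
    have h : PySem.List.pyRange 0 ((2:Nat) : Int) 1 = [0, 1] := by decide
    simp only [List.length_cons, List.length_nil, Nat.zero_add, Nat.reduceAdd] at *
    rw [h]
    have hs : PySem.List.slice [x, y] none (some 3) = [x, y] := by simp [pysem]
    have hr : PySem.List.slice ([x, y] : List String) (some 3) none = [] := by simp [pysem]
    rw [hs, hr]
    refine String.toList_inj.mp ?_
    simp [concatS, gA, PySem.Str.join, PySem.Chars.join_cons_cons, PySem.Chars.join_singleton]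
  | [x, y, z] => by
    unfold chunkRec
    have h : PySem.List.pyRange 0 ((3:Nat) : Int) 1 = [0, 1, 2] := by decide
    simp only [List.length_cons, List.length_nil, Nat.zero_add, Nat.reduceAdd] at *
    rw [h]
    have hs : PySem.List.slice [x, y, z] none (some 3) = [x, y, z] := by simp [pysem]
    have hr : PySem.List.slice ([x, y, z] : List String) (some 3) none = [] := by simp [pysem]
    rw [hs, hr]
    refine String.toList_inj.mp ?_
    simp [concatS, gA, PySem.Str.join, PySem.Chars.join_cons_cons, PySem.Chars.join_singleton]
  | x :: y :: z :: w :: t => by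
    have ih := concat_gA_eq_chunkRec (w :: t)
    set arr : List String := x :: y :: z :: w :: t with harr
    have hlen : ((arr.length : Int)) = ((w :: t).length : Int) + 3 := by simp [harr]; ring
    rw [hlen]
    set m : Int := ((w :: t).length : Int) with hm
    have hm1 : (1:Int) ≤ m := by rw [hm]; simp
    -- right-hand side: B peels the chunk [x, y, z] and recurses on w :: t
    have hr : PySem.List.slice arr (some 3) none = w :: t := by simp [harr, pysem]
    have hs : PySem.List.slice arr none (some 3) = [x, y, z] := by simp [harr, pysem]
    have halt : chunkRec arr =
        PySem.Str.join ", " [x, y, z] ++ ", \n" ++ chunkRec (w :: t) := by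
      rw [chunkRec.eq_def]
      rw [if_neg (by simp [harr])]
      simp only [hr, hs]
      rw [if_neg (by simp)]
    rw [halt]
    -- left-hand side: split the index range at 3
    rw [PySem.List.pyRange_one_append 0 3 (m + 3) (by norm_num) (by clear_value m; omega)]
    rw [show PySem.List.pyRange 0 3 1 = [0, 1, 2] from by decide]
    rw [List.map_append, concatS_append]
    -- the indices from 3 produce exactly A's output on w :: t
    have htail : concatS ((PySem.List.pyRange 3 (m + 3) 1).map (gA arr (m + 3))) =
        chunkRec (w :: t) := by
      rw [PySem.List.pyRange_one 3 (m + 3)]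
      rw [← ih]
      rw [PySem.List.pyRange_one 0 m]
      simp only [List.map_map]
      congr 1
      have hmt : ((m + 3) - 3).toNat = (m - 0).toNat := by clear_value m; omega
      rw [hmt]
      apply List.map_congr_left
      intro k hk
      simp only [Function.comp]
      have := gA_shift x y z (w :: t) k
      rw [hm]
      simp only [Int.zero_add]
      simpa [harr, hm] using this
    rw [htail]
    have hg0 : PySem.List.pyGet? arr 0 = some x := by simp [harr, PySem.List.pyGet?_zero_cons]
    have hg1 : PySem.List.pyGet? arr 1 = some y := by
      rw [harr, show (1:Int) = ((1:Nat):Int) from by norm_num, PySem.List.pyGet?_natCast]; rfl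
    have hg2 : PySem.List.pyGet? arr 2 = some z := by
      rw [harr, show (2:Int) = ((2:Nat):Int) from by norm_num, PySem.List.pyGet?_natCast]; rfl
    refine String.toList_inj.mp ?_
    simp [concatS, gA, hg0, hg1, hg2, PySem.Str.join, PySem.Chars.join_cons_cons,
      PySem.Chars.join_singleton,
      show ¬((0 : Int) = m + 3 - 1) from by clear_value m; omega,
      show ¬((1 : Int) = m + 3 - 1) from by clear_value m; omega,
      show ¬((2 : Int) = m + 3 - 1) from by clear_value m; omega]
termination_by arr => arr.length

theorem altParts_eq (arr : List String) (parts : List String) (i : Nat) :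
    altParts arr parts i = parts ++ chunksOf (arr.drop i) := by
  rw [altParts]
  by_cases h : i < arr.length
  · rw [if_pos h]
    have hlen : (arr.drop i).length = arr.length - i := by simp
    have hne : arr.drop i ≠ [] := by
      intro hz
      rw [hz] at hlen
      simp at hlen
      omega
    have hchunk : PySem.List.slice arr (some (i : Int)) (some ((i : Int) + 3)) =
        PySem.List.slice (arr.drop i) none (some 3) := by
      rw [show ((i : Int) + 3) = ((i : Int) + ((3 : Nat) : Int)) from by norm_num,
        PySem.List.slice_natCast_add]
      simp [pysem]
    have hrest : PySem.List.slice (arr.drop i) (some 3) none = arr.drop (i + 3) := by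
      simp [pysem, List.drop_drop]
    rw [altParts_eq arr _ (i + 3)]
    conv_rhs => rw [chunksOf.eq_def]
    rw [if_neg hne, hchunk, hrest]
    simp
  · rw [if_neg h]
    have h0 : arr.drop i = [] := by
      apply List.drop_eq_nil_of_le
      omega
    rw [h0, chunksOf]
    simp
termination_by arr.length - i
decreasing_by omega

theorem chunksOf_ne_nil (arr : List String) (h : arr ≠ []) : chunksOf arr ≠ [] := by
  rw [chunksOf.eq_def, if_neg h]
  simp

theorem join_chunksOf (arr : List String) :
    PySem.Str.join ", \n" (chunksOf arr) = chunkRec arr := by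
  rw [chunksOf.eq_def, chunkRec.eq_def]
  by_cases h : arr = []
  · rw [if_pos h, if_pos h]
    rfl
  · rw [if_neg h, if_neg h]
    have hr3 : PySem.List.slice arr (some 3) none = arr.drop 3 := by simp [pysem]
    by_cases hr : PySem.List.slice arr (some 3) none = []
    · rw [hr, if_pos rfl, chunksOf]
      refine String.toList_inj.mp ?_
      simp [PySem.Str.join, PySem.Chars.join_singleton]
    · rw [if_neg hr]
      have ih := join_chunksOf (PySem.List.slice arr (some 3) none)
      obtain ⟨c, t, hct⟩ := List.exists_cons_of_ne_nil (chunksOf_ne_nil _ hr)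
      rw [hct] at ih ⊢
      refine String.toList_inj.mp ?_
      rw [← ih]
      simp [PySem.Str.join, PySem.Chars.join_cons_cons]
termination_by arr.length
decreasing_by
  rw [hr3]
  have : arr.length ≠ 0 := fun hz => h (List.eq_nil_of_length_eq_zero hz)
  simp only [List.length_drop]
  omega

-- ===== VERDICT (by name: the statement is the Claim_ definition above) =====
theorem threeListToString_spec : Claim_equal_threeListToString := by
  intro arr _
  unfold Spec_threeListToString
  rw [threeListToString_eq_concat, concat_gA_eq_chunkRec, threeListToString_alt, altParts_eq]
  simp [join_chunksOf]
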